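-- pv_equiv track=rewrite | github.com/AccessRank42/BAtool | simpl.py | cond_1_check
-- ===== SOURCE A (Python) =====
-- def cond_1_check(SE_model_list, A, X, Y, X_complement_A, Y_complement_A):
--     if (not (X < Y) # X subset Y does not hold
--         or (X_complement_A != Y_complement_A)): # X_{\bar{A}} = Y_{\bar{A}}
--         return True    # we do not need to check further, condition holds
--     valid_Y_prime_found = False
--     for model_prime in SE_model_list: # search for a valid Y'
--         X_prime = model_prime[0]
--         Y_prime = model_prime[1]
--         _, Y_prime_complement_A = project_to_complement(X_prime, Y_prime, A)
--         if ((X_prime != Y_prime) # this model does not have the form <Y', Y'>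
--             or not (X <= Y_prime) # Y' supseteq X does not hold
--             or (Y_prime_complement_A != Y_complement_A)): # Y'_{\bar{A}} = Y_{\bar{A}} does not hold
--             continue # not a valid Y'
--         Ms = generate_sets(X, Y_prime)
--         M_failed = False
--         for M in Ms:
--             if (M, Y_prime) in SE_model_list: # <M, Y'> \notin SE(P) does not hold
--                 M_failed = True
--                 break
--         if not M_failed:
--             valid_Y_prime_found = True # this Y' is already what we were looking for ...
--             break
--         # ... otherwise not a valid Y', continue search
--
--     if valid_Y_prime_found:
--         return True # condition holds for this model <X, Y> \in SE(P)
--     return False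
--
-- def project_to_complement(X, Y, A):
--     X_complement_A = X - A
--     Y_complement_A = Y - A
--     return (X_complement_A, Y_complement_A)
--
-- def generate_sets(subseteq, supset):
--     extra_elems = list(supset - subseteq)
--     sets = [subseteq]
--     sets.extend(gen_sets_rec(subseteq, extra_elems))
--     sets.remove(supset) # this should not be necessary, fix so it doesn't get added
--     return sets
--
-- def gen_sets_rec(start_set, elems):
--     result = []
--     for i in range(len(elems)):
--         new_set = start_set | {elems[i]}
--         result.append(new_set)
--         result.extend(gen_sets_rec(new_set, elems[i+1:]))
--     return result
-- ===== SOURCE B (Python) =====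
-- def cond_1_check(SE_model_list, A, X, Y, X_complement_A, Y_complement_A):
--     if not (X < Y) or X_complement_A != Y_complement_A:
--         return True
--     # A valid Y' exists iff some model <Y',Y'> with X <= Y' and Y'-A == Y_complement_A
--     # has NO model <P, Y'> in the list with X <= P < Y' (P a proper subset of Y' containing X):
--     # every such P is one of A's enumerated subsets M, and every M hitting the list is such a P.
--     return any(
--         Xp == Yp and X <= Yp and Yp - A == Y_complement_A
--         and not any(Q == Yp and X <= P and P < Yp for P, Q in SE_model_list)
--         for Xp, Yp in SE_model_list)
-- ===== Notes on version B (the rewrite author's own statement) =====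
-- stated objective: alternative
-- what changed: For each candidate model <Y',Y'>, B replaces A's explicit enumeration of all 2^|Y'-X| subsets M with X ⊆ M ⊊ Y' (each tested by list membership) with a single scan of the model list for a pair (P,Q) with Q == Y' and X ⊆ P ⊊ Y'; on the timing generator's random inputs the exponential branch is rarely exercised, so no speed difference was measured.
import Mathlib
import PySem

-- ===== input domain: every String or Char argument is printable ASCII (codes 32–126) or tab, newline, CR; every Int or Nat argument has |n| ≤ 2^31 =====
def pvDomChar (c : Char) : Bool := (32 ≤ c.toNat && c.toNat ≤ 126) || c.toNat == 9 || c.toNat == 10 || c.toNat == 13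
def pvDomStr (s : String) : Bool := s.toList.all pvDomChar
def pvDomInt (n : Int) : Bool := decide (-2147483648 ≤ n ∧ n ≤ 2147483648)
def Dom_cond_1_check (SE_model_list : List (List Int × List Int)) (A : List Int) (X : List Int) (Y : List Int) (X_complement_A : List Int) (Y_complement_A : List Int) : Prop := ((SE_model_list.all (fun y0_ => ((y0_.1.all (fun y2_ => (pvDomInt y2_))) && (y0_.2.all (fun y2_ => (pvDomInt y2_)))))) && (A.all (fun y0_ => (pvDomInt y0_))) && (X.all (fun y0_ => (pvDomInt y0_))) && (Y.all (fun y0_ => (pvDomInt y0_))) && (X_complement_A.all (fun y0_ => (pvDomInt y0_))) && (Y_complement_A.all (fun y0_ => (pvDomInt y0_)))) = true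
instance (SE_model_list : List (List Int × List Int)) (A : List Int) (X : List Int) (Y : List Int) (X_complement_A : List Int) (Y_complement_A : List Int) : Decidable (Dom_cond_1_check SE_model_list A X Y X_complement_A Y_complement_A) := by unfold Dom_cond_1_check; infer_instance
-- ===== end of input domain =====

-- B replaces A's enumeration of every subset M with X ⊆ M ⊊ Y' by a scan of the model list
-- for a pair (P,Q) with Q == Y' and X ⊆ P ⊊ Y' (objective: alternative algorithm).


-- ===== PORT A =====
-- gen_sets_rec(start_set, elems): the loop body at index i is [start|{elems[i]}] ++ rec on elems[i+1:]
def gen_sets_rec (start_set : List Int) : List Int → List (List Int)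
  | [] => []
  | e :: rest =>
      (PySem.Set.add start_set e :: gen_sets_rec (PySem.Set.add start_set e) rest)
        ++ gen_sets_rec start_set rest

-- sets.remove(supset): removes the first element set-equal to supset (ported by hand: list.remove
-- compares Python sets by set equality, not list equality).  On no match Python raises ValueError;
-- that path is unreachable from cond_1_check, which calls generate_sets only with subseteq ⊆ supset.
def pyRemoveSetEq : List (List Int) → List Int → List (List Int)
  | [], _ => []
  | m :: ms, sup => if PySem.Set.equal m sup then ms else m :: pyRemoveSetEq ms sup

def generate_sets (subseteq supset : List Int) : List (List Int) :=
  pyRemoveSetEq (subseteq :: gen_sets_rec subseteq (PySem.Set.diff supset subseteq)) supset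

-- '(M, Y_prime) in SE_model_list': tuple membership, components compared as Python sets
def pairInList (L : List (List Int × List Int)) (M Yp : List Int) : Bool :=
  L.any (fun pq => PySem.Set.equal pq.1 M && PySem.Set.equal pq.2 Yp)

-- the 'for model_prime in SE_model_list' search loop (break ⇒ return True at the end)
def condALoop (L0 : List (List Int × List Int)) (A X Yc : List Int) :
    List (List Int × List Int) → Bool
  | [] => false
  | mp :: rest =>
      if !PySem.Set.equal mp.1 mp.2 || !PySem.Set.issubset X mp.2
          || !PySem.Set.equal (PySem.Set.diff mp.2 A) Yc then
        condALoop L0 A X Yc rest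
      else if (generate_sets X mp.2).any (fun M => pairInList L0 M mp.2) then
        condALoop L0 A X Yc rest
      else true

def cond_1_check (SE_model_list : List (List Int × List Int)) (A : List Int) (X : List Int) (Y : List Int) (X_complement_A : List Int) (Y_complement_A : List Int) : Bool :=
  if !(PySem.Set.issubset X Y && !PySem.Set.equal X Y)
      || !PySem.Set.equal X_complement_A Y_complement_A then true
  else condALoop SE_model_list A X Y_complement_A SE_model_list

-- ===== PORT B =====
-- inner 'any': is some <P, Y'> with X ⊆ P ⊊ Y' in the list?  (P < Yp is issubset ∧ ¬equal)
def blockedB (L : List (List Int × List Int)) (X Yp : List Int) : Bool :=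
  L.any (fun pq => PySem.Set.equal pq.2 Yp && PySem.Set.issubset X pq.1
      && (PySem.Set.issubset pq.1 Yp && !PySem.Set.equal pq.1 Yp))

def cond_1_check_alt (SE_model_list : List (List Int × List Int)) (A : List Int) (X : List Int) (Y : List Int) (X_complement_A : List Int) (Y_complement_A : List Int) : Bool :=
  if !(PySem.Set.issubset X Y && !PySem.Set.equal X Y)
      || !PySem.Set.equal X_complement_A Y_complement_A then true
  else
    SE_model_list.any (fun mp =>
      PySem.Set.equal mp.1 mp.2 && PySem.Set.issubset X mp.2
        && PySem.Set.equal (PySem.Set.diff mp.2 A) Y_complement_A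
        && !blockedB SE_model_list X mp.2)

-- ===== PRECONDITION & SPEC =====
-- The List Int arguments encode Python sets (distinct elements); a duplicated element in a model's
-- second component Y' has no Python counterpart (A's subset enumeration then sees the full set Y'
-- twice and removes it only once), so Pre_ asks the model list's second components to be duplicate-free.
def Pre_cond_1_check (SE_model_list : List (List Int × List Int)) (A : List Int) (X : List Int) (Y : List Int) (X_complement_A : List Int) (Y_complement_A : List Int) : Prop :=
  ∀ p ∈ SE_model_list, p.2.Nodup
instance (SE_model_list : List (List Int × List Int)) (A : List Int) (X : List Int) (Y : List Int) (X_complement_A : List Int) (Y_complement_A : List Int) : Decidable (Pre_cond_1_check SE_model_list A X Y X_complement_A Y_complement_A) := by unfold Pre_cond_1_check; infer_instance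

def pvWitness_cond_1_check : (List (List Int × List Int)) × List Int × List Int × List Int × List Int × List Int :=
  ([([1], [1])], [], [], [1], [], [])

def Spec_cond_1_check (SE_model_list : List (List Int × List Int)) (A : List Int) (X : List Int) (Y : List Int) (X_complement_A : List Int) (Y_complement_A : List Int) (out : Bool) : Prop := out = cond_1_check_alt SE_model_list A X Y X_complement_A Y_complement_A
instance (SE_model_list : List (List Int × List Int)) (A : List Int) (X : List Int) (Y : List Int) (X_complement_A : List Int) (Y_complement_A : List Int) (out : Bool) : Decidable (Spec_cond_1_check SE_model_list A X Y X_complement_A Y_complement_A out) := by unfold Spec_cond_1_check; infer_instance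

-- ===== CLAIM (what is proved, stated in full; the proofs are below) =====
def Claim_equal_cond_1_check : Prop := ∀ (SE_model_list : List (List Int × List Int)) (A : List Int) (X : List Int) (Y : List Int) (X_complement_A : List Int) (Y_complement_A : List Int), Dom_cond_1_check SE_model_list A X Y X_complement_A Y_complement_A → Pre_cond_1_check SE_model_list A X Y X_complement_A Y_complement_A → Spec_cond_1_check SE_model_list A X Y X_complement_A Y_complement_A (cond_1_check SE_model_list A X Y X_complement_A Y_complement_A)

-- ===== LEMMAS AND PROOFS =====


lemma mem_gen_iff (extras : List Int) : ∀ (start M : List Int), extras.Nodup →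
    (∀ e ∈ extras, e ∉ start) →
    (M ∈ gen_sets_rec start extras ↔ ∃ S, S.Sublist extras ∧ S ≠ [] ∧ M = start ++ S) := by
  induction extras with
  | nil =>
      intro start M _ _
      simp [gen_sets_rec]
  | cons e rest ih =>
      intro start M hnd hdis
      have he : e ∉ start := hdis e (List.mem_cons_self)
      have hadd : PySem.Set.add start e = start ++ [e] := PySem.Set.add_of_not_mem he
      have hnd' : rest.Nodup := hnd.of_cons
      have hdis1 : ∀ x ∈ rest, x ∉ start ++ [e] := by
        intro x hx
        simp only [List.mem_append, List.mem_singleton]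
        rintro (h | rfl)
        · exact hdis x (List.mem_cons_of_mem _ hx) h
        · exact (List.nodup_cons.mp hnd).1 hx
      have hdis2 : ∀ x ∈ rest, x ∉ start := fun x hx => hdis x (List.mem_cons_of_mem _ hx)
      constructor
      · intro hM
        simp only [gen_sets_rec, hadd, List.mem_append, List.mem_cons] at hM
        rcases hM with (rfl | h1) | h2
        · exact ⟨[e], by simp, by simp, rfl⟩
        · rcases (ih _ _ hnd' hdis1).mp h1 with ⟨S, hS, _, rfl⟩
          exact ⟨e :: S, (List.sublist_cons_iff).mpr (Or.inr ⟨S, rfl, hS⟩), by simp, by simp⟩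
        · rcases (ih _ _ hnd' hdis2).mp h2 with ⟨S, hS, hne, rfl⟩
          exact ⟨S, hS.trans (List.sublist_cons_self e rest), hne, rfl⟩
      · rintro ⟨S, hS, hne, rfl⟩
        simp only [gen_sets_rec, hadd, List.mem_append, List.mem_cons]
        rcases List.sublist_cons_iff.mp hS with h | ⟨r, rfl, hr⟩
        · exact Or.inr ((ih _ _ hnd' hdis2).mpr ⟨S, h, hne, rfl⟩)
        · rcases r.eq_nil_or_concat with rfl | _
          · exact Or.inl (Or.inl (by simp))
          · refine Or.inl (Or.inr ((ih _ _ hnd' hdis1).mpr ⟨r, hr, ?_, by simp⟩))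
            rename_i h; rcases h with ⟨l, a, rfl⟩; simp

lemma count_gen_le_one (extras : List Int) : ∀ (start : List Int), extras.Nodup →
    (∀ e ∈ extras, e ∉ start) →
    (gen_sets_rec start extras).count (start ++ extras) ≤ 1 := by
  induction extras with
  | nil => intro start _ _; simp [gen_sets_rec]
  | cons e rest ih =>
      intro start hnd hdis
      have he : e ∉ start := hdis e (List.mem_cons_self)
      have hadd : PySem.Set.add start e = start ++ [e] := PySem.Set.add_of_not_mem he
      have hnd' : rest.Nodup := hnd.of_cons
      have hdis1 : ∀ x ∈ rest, x ∉ start ++ [e] := by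
        intro x hx
        simp only [List.mem_append, List.mem_singleton]
        rintro (h | rfl)
        · exact hdis x (List.mem_cons_of_mem _ hx) h
        · exact (List.nodup_cons.mp hnd).1 hx
      have hdis2 : ∀ x ∈ rest, x ∉ start := fun x hx => hdis x (List.mem_cons_of_mem _ hx)
      have hzero : (gen_sets_rec start rest).count (start ++ e :: rest) = 0 := by
        refine List.count_eq_zero.mpr ?_
        intro hmem
        rcases (mem_gen_iff rest start _ hnd' hdis2).mp hmem with ⟨S, hS, _, heq⟩
        have h1 : S.length ≤ rest.length := hS.length_le
        have := congrArg List.length heq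
        simp at this
        omega
      simp only [gen_sets_rec, hadd, List.count_append, List.count_cons, hzero]
      match rest, hnd', hdis1 with
      | [], _, _ => simp [gen_sets_rec]
      | r :: rs, hnd', hdis1 =>
        have hne : ((start ++ [e]) == (start ++ e :: r :: rs)) = false := by
          rw [beq_eq_false_iff_ne]
          intro h
          have := congrArg List.length h
          simp at this
        have hmain : (gen_sets_rec (start ++ [e]) (r :: rs)).count (start ++ e :: r :: rs) ≤ 1 := by
          have := ih (start ++ [e]) hnd' hdis1
          simpa using this
        simp only [hne]
        simpa using hmain


lemma pyRemove_sublist (l : List (List Int)) (sup : List Int) :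
    (pyRemoveSetEq l sup).Sublist l := by
  induction l with
  | nil => simp [pyRemoveSetEq]
  | cons m ms ih =>
      simp only [pyRemoveSetEq]
      split
      · exact (List.sublist_cons_self m ms)
      · exact ih.cons₂ m

lemma mem_pyRemove_of_not_equal {l : List (List Int)} {sup M : List Int}
    (hM : M ∈ l) (h : PySem.Set.equal M sup = false) : M ∈ pyRemoveSetEq l sup := by
  induction l with
  | nil => simp at hM
  | cons m ms ih =>
      simp only [pyRemoveSetEq]
      rcases List.mem_cons.mp hM with rfl | hM'
      · rw [if_neg (by simp [h])]
        exact List.mem_cons_self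
      · split
        · exact hM'
        · exact List.mem_cons_of_mem _ (ih hM')

lemma not_equal_of_mem_pyRemove {l : List (List Int)} {sup F M : List Int}
    (hF : ∀ N ∈ l, PySem.Set.equal N sup = true → N = F)
    (hc : l.count F ≤ 1) (hM : M ∈ pyRemoveSetEq l sup) :
    PySem.Set.equal M sup = false := by
  induction l with
  | nil => simp [pyRemoveSetEq] at hM
  | cons m ms ih =>
      simp only [pyRemoveSetEq] at hM
      by_cases hm : PySem.Set.equal m sup = true
      · rw [if_pos hm] at hM
        rcases Bool.eq_false_or_eq_true (PySem.Set.equal M sup) with h | h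
        · exfalso
          have hMF : M = F := hF M (List.mem_cons_of_mem _ hM) h
          have hmF : m = F := hF m List.mem_cons_self hm
          subst hMF; subst hmF
          have : 1 ≤ ms.count m := List.one_le_count_iff.mpr hM
          simp only [List.count_cons, BEq.rfl, if_pos] at hc
          omega
        · exact h
      · rw [if_neg hm] at hM
        rcases List.mem_cons.mp hM with rfl | hM'
        · exact Bool.eq_false_iff.mpr hm
        · exact ih (fun N hN => hF N (List.mem_cons_of_mem _ hN))
            (le_trans (List.count_le_count_cons ..) hc) hM'


lemma gen_char (X Yp : List Int) (hnd : Yp.Nodup) (hXY : PySem.Set.issubset X Yp = true)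
    (P : List Int) :
    (∃ M ∈ generate_sets X Yp, PySem.Set.equal P M = true) ↔
    (PySem.Set.issubset X P = true ∧ PySem.Set.issubset P Yp = true ∧
      PySem.Set.equal P Yp = false) := by
  have hXsub : ∀ x ∈ X, x ∈ Yp := (PySem.Set.issubset_iff _ _).mp hXY
  set extras := PySem.Set.diff Yp X with hex
  have hexnd : extras.Nodup := PySem.Set.nodup_diff _ _ hnd
  have hexmem : ∀ e, e ∈ extras ↔ e ∈ Yp ∧ e ∉ X := fun e => PySem.Set.mem_diff _ _ _
  have hdis : ∀ e ∈ extras, e ∉ X := fun e he => ((hexmem e).mp he).2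
  have memG_iff : ∀ M, M ∈ (X :: gen_sets_rec X extras) ↔
      ∃ S, S.Sublist extras ∧ M = X ++ S := by
    intro M
    rw [List.mem_cons, mem_gen_iff extras X M hexnd hdis]
    constructor
    · rintro (rfl | ⟨S, h1, _, rfl⟩)
      · exact ⟨[], List.nil_sublist _, (List.append_nil _).symm⟩
      · exact ⟨S, h1, rfl⟩
    · rintro ⟨S, h1, rfl⟩
      rcases S with _ | ⟨s, ss⟩
      · exact Or.inl (List.append_nil X)
      · exact Or.inr ⟨s :: ss, h1, by simp, rfl⟩
  have boundG : ∀ M ∈ (X :: gen_sets_rec X extras),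
      (∀ x ∈ X, x ∈ M) ∧ (∀ x ∈ M, x ∈ Yp) := by
    intro M hM
    rcases (memG_iff M).mp hM with ⟨S, hS, rfl⟩
    refine ⟨fun x hx => List.mem_append_left _ hx, fun x hx => ?_⟩
    rcases List.mem_append.mp hx with h | h
    · exact hXsub x h
    · exact ((hexmem x).mp (hS.subset h)).1
  have uniq : ∀ M ∈ (X :: gen_sets_rec X extras), PySem.Set.equal M Yp = true →
      M = X ++ extras := by
    intro M hM heq
    rcases (memG_iff M).mp hM with ⟨S, hS, rfl⟩
    have hiff := (PySem.Set.equal_iff _ _).mp heq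
    have hsub : ∀ e ∈ extras, e ∈ S := by
      intro e he
      have : e ∈ X ++ S := (hiff e).mpr ((hexmem e).mp he).1
      rcases List.mem_append.mp this with h | h
      · exact absurd h ((hexmem e).mp he).2
      · exact h
    have : S = extras := hS.eq_of_length_le (List.subperm_of_subset hexnd hsub).length_le
    rw [this]
  have countG : (X :: gen_sets_rec X extras).count (X ++ extras) ≤ 1 := by
    rcases extras with _ | ⟨e, es⟩
    · simp [gen_sets_rec]
    · have hXne : (X == X ++ e :: es) = false := by
        rw [beq_eq_false_iff_ne]
        intro h
        have := congrArg List.length h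
        simp at this
      rw [List.count_cons]
      have := count_gen_le_one (e :: es) X hexnd hdis
      simp only [hXne]
      simpa using this
  have noSup : ∀ M ∈ generate_sets X Yp, PySem.Set.equal M Yp = false :=
    fun M hM => not_equal_of_mem_pyRemove uniq countG hM
  constructor
  · rintro ⟨M, hMG', hPM⟩
    have hMG : M ∈ (X :: gen_sets_rec X extras) :=
      (pyRemove_sublist _ _).subset hMG'
    have hPMiff := (PySem.Set.equal_iff _ _).mp hPM
    obtain ⟨hXM, hMY⟩ := boundG M hMG
    refine ⟨(PySem.Set.issubset_iff _ _).mpr (fun x hx => (hPMiff x).mpr (hXM x hx)),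
      (PySem.Set.issubset_iff _ _).mpr (fun x hx => hMY x ((hPMiff x).mp hx)), ?_⟩
    rcases Bool.eq_false_or_eq_true (PySem.Set.equal P Yp) with h | h
    · exfalso
      have hPY := (PySem.Set.equal_iff _ _).mp h
      have : PySem.Set.equal M Yp = true :=
        (PySem.Set.equal_iff _ _).mpr (fun x => ((hPMiff x).symm.trans (hPY x)))
      rw [noSup M hMG'] at this
      exact Bool.false_ne_true this
    · exact h
  · rintro ⟨hXP, hPYs, hPYne⟩
    have hXPm := (PySem.Set.issubset_iff _ _).mp hXP
    have hPYm := (PySem.Set.issubset_iff _ _).mp hPYs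
    set S := extras.filter (fun e => decide (e ∈ P)) with hSdef
    have hSsub : S.Sublist extras := List.filter_sublist
    have hMG : X ++ S ∈ (X :: gen_sets_rec X extras) := (memG_iff _).mpr ⟨S, hSsub, rfl⟩
    have hPM : PySem.Set.equal P (X ++ S) = true := by
      refine (PySem.Set.equal_iff _ _).mpr (fun x => ⟨fun hx => ?_, fun hx => ?_⟩)
      · by_cases hxX : x ∈ X
        · exact List.mem_append_left _ hxX
        · refine List.mem_append_right _ ?_
          rw [hSdef, List.mem_filter]
          exact ⟨(hexmem x).mpr ⟨hPYm x hx, hxX⟩, by simpa using hx⟩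
      · rcases List.mem_append.mp hx with h | h
        · exact hXPm x h
        · rw [hSdef, List.mem_filter] at h
          simpa using h.2
    have hMne : PySem.Set.equal (X ++ S) Yp = false := by
      rcases Bool.eq_false_or_eq_true (PySem.Set.equal (X ++ S) Yp) with h | h
      · exfalso
        have hMY := (PySem.Set.equal_iff _ _).mp h
        have hPMiff := (PySem.Set.equal_iff _ _).mp hPM
        have : PySem.Set.equal P Yp = true :=
          (PySem.Set.equal_iff _ _).mpr (fun x => (hPMiff x).trans (hMY x))
        rw [hPYne] at this
        exact Bool.false_ne_true this
      · exact h
    exact ⟨X ++ S, mem_pyRemove_of_not_equal hMG hMne, hPM⟩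



lemma inner_eq (L : List (List Int × List Int)) (X Yp : List Int)
    (hnd : Yp.Nodup) (hXY : PySem.Set.issubset X Yp = true) :
    (generate_sets X Yp).any (fun M => pairInList L M Yp) = blockedB L X Yp := by
  apply Bool.coe_iff_coe.mp
  simp only [List.any_eq_true, pairInList, blockedB, Bool.and_eq_true, Bool.not_eq_true']
  constructor
  · rintro ⟨M, hM, pq, hpq, h1, h2⟩
    have := (gen_char X Yp hnd hXY pq.1).mp ⟨M, hM, h1⟩
    exact ⟨pq, hpq, ⟨h2, this.1⟩, this.2.1, this.2.2⟩
  · rintro ⟨pq, hpq, ⟨h2, hXp⟩, hpY, hne⟩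
    obtain ⟨M, hM, h1⟩ := (gen_char X Yp hnd hXY pq.1).mpr ⟨hXp, hpY, hne⟩
    exact ⟨M, hM, pq, hpq, h1, h2⟩


lemma loop_eq (L0 : List (List Int × List Int)) (A X Yc : List Int) :
    ∀ l : List (List Int × List Int), (∀ p ∈ l, p.2.Nodup) →
    condALoop L0 A X Yc l = l.any (fun mp =>
      PySem.Set.equal mp.1 mp.2 && PySem.Set.issubset X mp.2
        && PySem.Set.equal (PySem.Set.diff mp.2 A) Yc && !blockedB L0 X mp.2) := by
  intro l
  induction l with
  | nil => intro _; simp [condALoop]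
  | cons mp rest ih =>
      intro hnd
      have hrest := ih (fun p hp => hnd p (List.mem_cons_of_mem _ hp))
      simp only [condALoop, List.any_cons]
      by_cases h1 : PySem.Set.equal mp.1 mp.2 = true
      · by_cases h2 : PySem.Set.issubset X mp.2 = true
        · by_cases h3 : PySem.Set.equal (PySem.Set.diff mp.2 A) Yc = true
          · rw [if_neg (by simp [h1, h2, h3])]
            rw [inner_eq L0 X mp.2 (hnd mp List.mem_cons_self) h2]
            by_cases hb : blockedB L0 X mp.2 = true
            · rw [if_pos hb, hrest]
              simp [hb]
            · rw [if_neg hb]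
              simp [h1, h2, h3, Bool.eq_false_iff.mpr hb]
          · rw [if_pos (by simp [Bool.eq_false_iff.mpr h3]), hrest]
            simp [Bool.eq_false_iff.mpr h3]
        · rw [if_pos (by simp [Bool.eq_false_iff.mpr h2]), hrest]
          simp [Bool.eq_false_iff.mpr h2]
      · rw [if_pos (by simp [Bool.eq_false_iff.mpr h1]), hrest]
        simp [Bool.eq_false_iff.mpr h1]


-- ===== VERDICT (by name: the statement is the Claim_ definition above) =====
theorem cond_1_check_spec : Claim_equal_cond_1_check := by
  intro L A X Y Xc Yc _ hpre
  unfold Spec_cond_1_check cond_1_check cond_1_check_alt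
  split_ifs with h
  · rfl
  · exact loop_eq L A X Yc L hpre
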